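-- pv_equiv track=rewrite | github.com/javilol5/ejercicios-programacion-castelao | boletines/Boletin 7/Boletin7_13.py | reemplazar_caracter
-- ===== SOURCE A (Python) =====
-- def reemplazar_caracter(texto, caracter, max_accions):
--     sol = ""
--     cont = 0
--     for char in texto:
--         if cont < max_accions:
--             sol += caracter
--             cont += 1
--         else:
--             sol += char
--     return sol
-- ===== SOURCE B (Python) =====
-- def reemplazar_caracter(texto, caracter, max_accions):
--     n = max(0, min(max_accions, len(texto)))
--     return caracter * n + texto[n:]
-- ===== Notes on version B (the rewrite author's own statement) =====
-- stated objective: simpler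
-- what changed: Replaced the per-character loop with a counter by a clamped count n and one expression: caracter * n + texto[n:].
import Mathlib
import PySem

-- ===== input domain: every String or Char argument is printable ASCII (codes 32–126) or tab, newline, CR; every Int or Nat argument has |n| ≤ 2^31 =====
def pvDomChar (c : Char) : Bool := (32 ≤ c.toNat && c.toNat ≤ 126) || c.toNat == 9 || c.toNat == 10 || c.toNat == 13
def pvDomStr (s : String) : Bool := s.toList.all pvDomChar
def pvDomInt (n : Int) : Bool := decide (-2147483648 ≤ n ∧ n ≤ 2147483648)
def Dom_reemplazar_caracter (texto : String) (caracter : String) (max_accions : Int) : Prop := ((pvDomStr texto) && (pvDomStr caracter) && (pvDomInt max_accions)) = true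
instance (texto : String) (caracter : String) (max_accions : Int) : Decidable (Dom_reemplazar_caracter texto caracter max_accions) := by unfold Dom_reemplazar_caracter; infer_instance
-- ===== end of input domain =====

-- B replaces A's accumulating loop with a clamped count n and one expression: caracter repeated n times ++ texto[n:] (simpler, same cost).

-- ===== PORT A =====
-- A's loop over texto with accumulator sol and counter cont (strings handled as List Char).
def reemplazar_caracter (texto : String) (caracter : String) (max_accions : Int) : String :=
  let r := texto.toList.foldl
    (fun (p : List Char × Int) ch =>
      if p.2 < max_accions then (p.1 ++ caracter.toList, p.2 + 1) else (p.1 ++ [ch], p.2))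
    ([], 0)
  String.mk r.1

-- ===== PORT B =====
-- n = max(0, min(max_accions, len(texto))); caracter * n + texto[n:]
def reemplazar_caracter_alt (texto : String) (caracter : String) (max_accions : Int) : String :=
  let n : Nat := (max 0 (min max_accions (texto.toList.length : Int))).toNat
  String.mk ((List.replicate n caracter.toList).flatten ++ texto.toList.drop n)

-- ===== PRECONDITION & SPEC =====
def Spec_reemplazar_caracter (texto : String) (caracter : String) (max_accions : Int) (out : String) : Prop := out = reemplazar_caracter_alt texto caracter max_accions
instance (texto : String) (caracter : String) (max_accions : Int) (out : String) : Decidable (Spec_reemplazar_caracter texto caracter max_accions out) := by unfold Spec_reemplazar_caracter; infer_instance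

-- ===== CLAIM (what is proved, stated in full; the proofs are below) =====
def Claim_equal_reemplazar_caracter : Prop := ∀ (texto : String) (caracter : String) (max_accions : Int), Dom_reemplazar_caracter texto caracter max_accions → Spec_reemplazar_caracter texto caracter max_accions (reemplazar_caracter texto caracter max_accions)

-- ===== LEMMAS AND PROOFS =====

-- Loop invariant: A's fold from counter k and accumulator acc produces acc ++ (replicate n c).flatten ++ drop n l,
-- where n clamps (m - k) into [0, l.length].
theorem pv_loop_eq (m : Int) (c : List Char) (l : List Char) (k : Int) (acc : List Char) :
    (l.foldl (fun (p : List Char × Int) ch =>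
        if p.2 < m then (p.1 ++ c, p.2 + 1) else (p.1 ++ [ch], p.2)) (acc, k)).1
      = acc ++ (List.replicate ((min (m - k) (l.length : Int)).toNat) c).flatten
            ++ l.drop ((min (m - k) (l.length : Int)).toNat) := by
  induction l generalizing k acc with
  | nil =>
    simp
  | cons ch t ih =>
    simp only [List.foldl_cons]
    by_cases h : k < m
    · have hn : (min (m - k) ((ch :: t).length : Int)).toNat
          = (min (m - (k + 1)) ((t.length : Int))).toNat + 1 := by
        simp only [List.length_cons]; push_cast; omega
      rw [if_pos h, ih (k + 1) (acc ++ c), hn]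
      simp [List.replicate_succ]
    · have hn : (min (m - k) ((ch :: t).length : Int)).toNat = 0 := by
        simp only [List.length_cons]; push_cast; omega
      have hn' : (min (m - k) ((t.length : Int))).toNat = 0 := by omega
      rw [if_neg h, ih k (acc ++ [ch]), hn, hn']
      simp

-- ===== VERDICT (by name: the statement is the Claim_ definition above) =====
theorem reemplazar_caracter_spec : Claim_equal_reemplazar_caracter := by
  intro texto caracter m _
  show _ = _
  simp only [reemplazar_caracter, reemplazar_caracter_alt]
  rw [pv_loop_eq]
  simp only [sub_zero, String.length_toList]
  have h2 : (min m ((texto.length : Int))).toNat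
      = (max 0 (min m (texto.length : Int))).toNat := by omega
  rw [h2, List.nil_append]
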